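-- pv_equiv track=rewrite | github.com/pierre-elie-project-coding/projet_MIR | data_process/read_and_plot.py | build_affine_signal
-- ===== SOURCE A (Python) =====
-- def build_affine_signal(signal: list[int]) -> list[int]:
--     """
--     1=monte 2= descend  ( -1=monte -2= descend mais dans l'autre sens) 3=plateau haut 0= plateau bas
--     """
--     step = 1  # TODO :change this value and link it to reality
--     affine_signal = []
--     current_val = 0
--
--     for v in signal:
--         if v in [1, 2]:           # Pente positive du profil temporel
--             current_val += step
--         elif v in [-1, -2]:       # Pente négative du profil temporel
--             current_val -= step
--         # Si v == 0 ou v == 3, current_val ne change pas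
--
--         affine_signal.append(current_val)
--
--     return affine_signal
-- ===== SOURCE B (Python) =====
-- def build_affine_signal(sig: list[int]) -> list[int]:
--     # Divide and conquer: integrate each half independently, then shift the
--     # right half by the left half's final value.
--     n = len(sig)
--     if n == 0:
--         return []
--     if n == 1:
--         v = sig[0]
--         return [1 if v in (1, 2) else -1 if v in (-1, -2) else 0]
--     mid = n // 2
--     left = build_affine_signal(sig[:mid])
--     right = build_affine_signal(sig[mid:])
--     off = left[-1]
--     return left + [off + x for x in right]
-- ===== Notes on version B (the rewrite author's own statement) =====
-- stated objective: alternative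
-- what changed: Replaces the running-total loop with a divide-and-conquer recursion: integrate each half independently and shift the right half's result by the left half's final value.
import Mathlib
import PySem

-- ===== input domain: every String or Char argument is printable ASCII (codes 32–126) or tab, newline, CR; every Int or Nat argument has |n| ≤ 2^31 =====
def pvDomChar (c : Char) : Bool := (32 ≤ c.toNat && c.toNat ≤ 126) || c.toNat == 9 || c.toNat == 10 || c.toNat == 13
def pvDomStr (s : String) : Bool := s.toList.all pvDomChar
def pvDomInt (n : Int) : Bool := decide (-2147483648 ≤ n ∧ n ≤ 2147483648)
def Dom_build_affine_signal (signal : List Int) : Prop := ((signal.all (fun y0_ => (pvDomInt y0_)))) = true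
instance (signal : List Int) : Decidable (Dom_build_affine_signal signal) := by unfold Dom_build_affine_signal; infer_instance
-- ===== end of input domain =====

-- B replaces A's running-total loop with divide and conquer: integrate each half independently, then shift the right half by the left half's final value (alternative decomposition, not claimed faster).

-- ===== PORT A =====
-- the for-loop of A: cur is current_val, the output list is built element by element
def buildA_loop (cur : Int) : List Int → List Int
  | [] => []
  | v :: vs =>
      let cur' := if v = 1 ∨ v = 2 then cur + 1
                  else if v = -1 ∨ v = -2 then cur - 1
                  else cur
      cur' :: buildA_loop cur' vs

def build_affine_signal (signal : List Int) : List Int := buildA_loop 0 signal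

-- ===== PORT B =====
-- the single-sample base case of Source B (its nested conditional expression)
def pvDelta (v : Int) : Int :=
  if v = 1 ∨ v = 2 then 1 else if v = -1 ∨ v = -2 then -1 else 0

-- Source B's divide and conquer; left[-1] ported as getLastD 0 — exact, since left is nonempty there
def build_affine_signal_alt : List Int → List Int
  | [] => []
  | [v] => [pvDelta v]
  | a :: b :: rest =>
      let l : List Int := a :: b :: rest
      let mid := l.length / 2
      let left := build_affine_signal_alt (l.take mid)
      let right := build_affine_signal_alt (l.drop mid)
      let off := left.getLastD 0
      left ++ right.map (fun x => off + x)
termination_by l => l.length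
decreasing_by
  · simp
    omega
  · simp
    omega

-- ===== PRECONDITION & SPEC =====
def Spec_build_affine_signal (signal : List Int) (out : List Int) : Prop := out = build_affine_signal_alt signal
instance (signal : List Int) (out : List Int) : Decidable (Spec_build_affine_signal signal out) := by unfold Spec_build_affine_signal; infer_instance

-- ===== CLAIM (what is proved, stated in full; the proofs are below) =====
def Claim_equal_build_affine_signal : Prop := ∀ (signal : List Int), Dom_build_affine_signal signal → Spec_build_affine_signal signal (build_affine_signal signal)

-- ===== LEMMAS AND PROOFS =====

-- the prefix-sum characterisation both implementations meet
def pvAcc (c : Int) : List Int → List Int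
  | [] => []
  | d :: ds => (c + d) :: pvAcc (c + d) ds

lemma buildA_loop_eq_acc (cur : Int) (vs : List Int) :
    buildA_loop cur vs = pvAcc cur (vs.map pvDelta) := by
  induction vs generalizing cur with
  | nil => rfl
  | cons v vs ih =>
      simp only [buildA_loop, List.map, pvAcc, pvDelta]
      split_ifs with h1 h2 <;> simp [ih] <;>
        exact ⟨by ring, by rw [sub_eq_add_neg]⟩

lemma pvAcc_append (c : Int) (ds es : List Int) :
    pvAcc c (ds ++ es) = pvAcc c ds ++ pvAcc (c + ds.sum) es := by
  induction ds generalizing c with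
  | nil => simp [pvAcc]
  | cons d ds ih => simp only [List.cons_append, pvAcc, ih, List.sum_cons, add_assoc]

lemma pvAcc_map_add (c b : Int) (ds : List Int) :
    (pvAcc b ds).map (fun x => c + x) = pvAcc (c + b) ds := by
  induction ds generalizing b with
  | nil => rfl
  | cons d ds ih => simp only [pvAcc, List.map, ih, add_assoc]

lemma pvAcc_getLast? (c d : Int) (ds : List Int) :
    (pvAcc c (d :: ds)).getLast? = some (c + (d :: ds).sum) := by
  induction ds generalizing c d with
  | nil => simp [pvAcc]
  | cons e es ih =>
      rw [show pvAcc c (d :: e :: es) = (c + d) :: pvAcc (c + d) (e :: es) from rfl,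
        show pvAcc (c + d) (e :: es) = (c + d + e) :: pvAcc (c + d + e) es from rfl,
        List.getLast?_cons_cons,
        show (c + d + e) :: pvAcc (c + d + e) es = pvAcc (c + d) (e :: es) from rfl,
        ih]
      simp
      ring

lemma pvAcc_getLastD (c : Int) (ds : List Int) (h : ds ≠ []) :
    (pvAcc c ds).getLastD 0 = c + ds.sum := by
  cases ds with
  | nil => exact absurd rfl h
  | cons d ds => rw [List.getLastD_eq_getLast?, pvAcc_getLast?]; rfl

lemma buildB_eq_acc (xs : List Int) :
    build_affine_signal_alt xs = pvAcc 0 (xs.map pvDelta) := by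
  fun_induction build_affine_signal_alt xs with
  | case1 => rfl
  | case2 v => simp [pvAcc]
  | case3 a b rest l mid left right off ihl ihr =>
      simp only [left, right, off, l, mid] at *
      rw [ihl, ihr]
      have hsplit : (a :: b :: rest) = (a :: b :: rest).take ((a :: b :: rest).length / 2)
          ++ (a :: b :: rest).drop ((a :: b :: rest).length / 2) := (List.take_append_drop _ _).symm
      have htake_ne : ((a :: b :: rest).take ((a :: b :: rest).length / 2)).map pvDelta ≠ [] := by
        simp
      rw [pvAcc_getLastD _ _ htake_ne, pvAcc_map_add]
      conv_rhs => rw [hsplit]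
      rw [List.map_append, pvAcc_append]
      simp

-- ===== VERDICT =====
theorem build_affine_signal_spec : Claim_equal_build_affine_signal := by
  intro signal _
  unfold Spec_build_affine_signal build_affine_signal
  rw [buildA_loop_eq_acc, buildB_eq_acc]
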